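-- pv_equiv track=rewrite | github.com/bradenkh/calendar | calendar.py | offset_from_jan_1753
-- ===== SOURCE A (Python) =====
-- def offset_from_jan_1753(year):
--    temp_year = int(1753)
--    temp_offset = int(0)
--    while temp_year < year:
--       if (temp_year % 100 == 0 and temp_year % 400 != 0):
--          temp_offset += 1
--       elif temp_year % 4 == 0:
--          temp_offset += 2
--       elif temp_year % 4 != 0:
--          temp_offset += 1
--       temp_year += 1
--    return temp_offset % 7
-- ===== SOURCE B (Python) =====
-- def offset_from_jan_1753(year):
--     if year <= 1753:
--         return 0
--     def leaps(y):
--         return y // 4 - y // 100 + y // 400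
--     return ((year - 1753) + leaps(year - 1) - leaps(1752)) % 7
-- ===== Notes on version B (the rewrite author's own statement) =====
-- stated objective: faster
-- what changed: Replaced the year-by-year while loop with a closed-form count: days offset = number of years plus number of leap years in [1753, year-1] via floor-division formulas, taken mod 7.
import Mathlib
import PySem

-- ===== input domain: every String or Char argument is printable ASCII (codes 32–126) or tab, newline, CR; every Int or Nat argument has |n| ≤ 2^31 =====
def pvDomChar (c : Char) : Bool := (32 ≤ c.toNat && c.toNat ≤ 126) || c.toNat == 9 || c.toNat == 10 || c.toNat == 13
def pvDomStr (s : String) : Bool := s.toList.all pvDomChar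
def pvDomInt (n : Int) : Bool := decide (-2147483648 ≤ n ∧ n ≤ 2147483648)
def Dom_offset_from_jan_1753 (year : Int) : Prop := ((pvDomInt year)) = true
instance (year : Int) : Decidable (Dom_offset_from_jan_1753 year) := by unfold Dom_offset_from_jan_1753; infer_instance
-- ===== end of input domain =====

-- B replaces the O(year) year-by-year loop by an O(1) closed-form leap-year count (objective: faster).

-- ===== PORT A =====
-- the while loop of A, step for step: state = (temp_year, temp_offset)
def offsetLoopA (year temp_year temp_offset : Int) : Int :=
  if temp_year < year then
    offsetLoopA year (temp_year + 1)
      (if PySem.Int.mod temp_year 100 = 0 ∧ PySem.Int.mod temp_year 400 ≠ 0 then temp_offset + 1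
       else if PySem.Int.mod temp_year 4 = 0 then temp_offset + 2
       else if PySem.Int.mod temp_year 4 ≠ 0 then temp_offset + 1
       else temp_offset)
  else temp_offset
termination_by (year - temp_year).toNat
decreasing_by omega

def offset_from_jan_1753 (year : Int) : Int :=
  PySem.Int.mod (offsetLoopA year 1753 0) 7

-- ===== PORT B =====
def leapsB (y : Int) : Int :=
  PySem.Int.floordiv y 4 - PySem.Int.floordiv y 100 + PySem.Int.floordiv y 400

def offset_from_jan_1753_alt (year : Int) : Int :=
  if year ≤ 1753 then 0
  else PySem.Int.mod ((year - 1753) + leapsB (year - 1) - leapsB 1752) 7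

-- ===== PRECONDITION & SPEC =====
def Spec_offset_from_jan_1753 (year : Int) (out : Int) : Prop := out = offset_from_jan_1753_alt year
instance (year : Int) (out : Int) : Decidable (Spec_offset_from_jan_1753 year out) := by unfold Spec_offset_from_jan_1753; infer_instance

-- ===== CLAIM (what is proved, stated in full; the proofs are below) =====
def Claim_equal_offset_from_jan_1753 : Prop := ∀ (year : Int), Dom_offset_from_jan_1753 year → Spec_offset_from_jan_1753 year (offset_from_jan_1753 year)

-- ===== LEMMAS AND PROOFS =====

-- one loop step adds 1 + (leapsB t - leapsB (t-1))
theorem step_eq (t : Int) :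
    (if PySem.Int.mod t 100 = 0 ∧ PySem.Int.mod t 400 ≠ 0 then (1:Int)
     else if PySem.Int.mod t 4 = 0 then 2
     else if PySem.Int.mod t 4 ≠ 0 then 1
     else 0) = 1 + (leapsB t - leapsB (t - 1)) := by
  simp only [leapsB, PySem.Int.mod_eq_emod_of_pos (a := t) (by norm_num : (0:Int) < 100),
    PySem.Int.mod_eq_emod_of_pos (a := t) (by norm_num : (0:Int) < 400),
    PySem.Int.mod_eq_emod_of_pos (a := t) (by norm_num : (0:Int) < 4),
    PySem.Int.floordiv_eq_ediv_of_pos (by norm_num : (0:Int) < 4),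
    PySem.Int.floordiv_eq_ediv_of_pos (by norm_num : (0:Int) < 100),
    PySem.Int.floordiv_eq_ediv_of_pos (by norm_num : (0:Int) < 400)]
  split_ifs <;> omega

theorem loop_closed (year : Int) : ∀ (k : Nat) (t off : Int), year - t = k →
    offsetLoopA year t off = off + (year - t) + (leapsB (year - 1) - leapsB (t - 1)) := by
  intro k
  induction k with
  | zero =>
    intro t off h
    rw [offsetLoopA]
    have : ¬ t < year := by omega
    simp [this]
    have : t = year := by omega
    simp [this]
  | succ n ih =>
    intro t off h
    rw [offsetLoopA]
    have ht : t < year := by omega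
    simp only [ht, if_pos]
    rw [ih (t + 1) _ (by omega)]
    have hc : t + 1 - 1 = t := by omega
    rw [hc]
    have hstep := step_eq t
    split_ifs at hstep ⊢ <;> omega

theorem loop_stop (year : Int) (h : ¬ 1753 < year) : offsetLoopA year 1753 0 = 0 := by
  rw [offsetLoopA]; simp [h]

-- ===== VERDICT (by name: the statement is the Claim_ definition above) =====
theorem offset_from_jan_1753_spec : Claim_equal_offset_from_jan_1753 := by
  intro year _
  unfold Spec_offset_from_jan_1753 offset_from_jan_1753 offset_from_jan_1753_alt
  by_cases h : year ≤ 1753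
  · rw [loop_stop year (by omega)]
    simp [h, PySem.Int.mod]
  · rw [loop_closed year (year - 1753).toNat 1753 0 (by omega)]
    simp only [h, if_false]
    congr 1
    have h1 : leapsB (1753 - 1) = 425 := by decide
    have h2 : leapsB 1752 = 425 := by decide
    omega
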